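-- pv_equiv track=rewrite | github.com/banshee0716/Leetcode | 2903-find-indices-with-index-and-value-difference-i/2903-find-indices-with-index-and-value-difference-i.py | findIndices
-- ===== SOURCE A (Python) =====
-- from typing import List
--
-- def findIndices(nums: List[int], indexDifference: int, valueDifference: int) -> List[int]:
--     if indexDifference == 0 and valueDifference == 0:
--         return [0,0]
--     for i in range(len(nums)-1):
--         for j in range(i, len(nums)):
--             if abs(i-j) >= indexDifference and abs(nums[i] - nums[j]) >= valueDifference:
--                 return [i, j]
--     return [-1, -1]
-- ===== SOURCE B (Python) =====
-- def findIndices(nums, indexDifference, valueDifference):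
--     if indexDifference == 0 and valueDifference == 0:
--         return [0, 0]
--     n = len(nums)
--     gap = indexDifference if indexDifference > 0 else 0
--     # suf[k] = (min(nums[k:]), max(nums[k:])), built back to front in one pass
--     suf = [None] * n
--     for k in range(n - 1, -1, -1):
--         v = nums[k]
--         if k == n - 1:
--             suf[k] = (v, v)
--         else:
--             lo, hi = suf[k + 1]
--             suf[k] = (v if v < lo else lo, v if v > hi else hi)
--     for i in range(n - 1):
--         s = i + gap
--         if s < n:
--             lo, hi = suf[s]
--             x = nums[i]
--             if x - lo >= valueDifference or hi - x >= valueDifference: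
--                 # some j in [s, n) works; find the smallest one
--                 for j in range(s, n):
--                     if abs(x - nums[j]) >= valueDifference:
--                         return [i, j]
--     return [-1, -1]
-- ===== Notes on version B (the rewrite author's own statement) =====
-- stated objective: faster
-- what changed: Replaces the O(n^2) nested pair scan by a single backward pass building suffix-(min,max) pairs, an O(n) scan for the first valid i using that table, then one forward scan for its smallest j.
import Mathlib
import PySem

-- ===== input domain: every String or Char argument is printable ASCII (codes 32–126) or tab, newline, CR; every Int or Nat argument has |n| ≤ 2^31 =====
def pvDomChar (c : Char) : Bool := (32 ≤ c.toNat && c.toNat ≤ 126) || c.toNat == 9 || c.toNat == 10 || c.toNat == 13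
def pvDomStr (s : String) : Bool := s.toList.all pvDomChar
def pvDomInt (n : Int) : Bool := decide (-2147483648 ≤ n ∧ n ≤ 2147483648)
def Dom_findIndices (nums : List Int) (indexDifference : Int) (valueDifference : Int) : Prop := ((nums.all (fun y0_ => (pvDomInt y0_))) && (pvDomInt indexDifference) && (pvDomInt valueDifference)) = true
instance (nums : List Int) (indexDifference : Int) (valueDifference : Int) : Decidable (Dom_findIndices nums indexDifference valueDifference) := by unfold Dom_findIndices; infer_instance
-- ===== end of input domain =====

-- B replaces A's O(n^2) nested pair scan by a backward suffix-(min,max) pass plus two linear scans (objective: faster, asymptotic).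

-- ===== PORT A =====
-- A: special case, then for i in range(n-1): for j in range(i, n): return [i,j] on first hit; else [-1,-1]
def findIndices (nums : List Int) (indexDifference : Int) (valueDifference : Int) : List Int :=
  if indexDifference = 0 ∧ valueDifference = 0 then [0, 0]
  else
    let n : Int := nums.length
    match (PySem.List.pyRange 0 (n - 1) 1).findSome? (fun i =>
      (PySem.List.pyRange i n 1).findSome? (fun j =>
        if |i - j| ≥ indexDifference ∧
           |PySem.List.pyGetD nums i 0 - PySem.List.pyGetD nums j 0| ≥ valueDifference
        then some [i, j] else none)) with
    | some r => r
    | none => [-1, -1]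

-- ===== PORT B =====
-- backward fill of suf[k] = (min(nums[k:]), max(nums[k:])) as structural recursion (Python's k = n-1 .. 0 loop)
def sufMM : List Int → List (Int × Int)
  | [] => []
  | v :: rest =>
    match sufMM rest with
    | [] => [(v, v)]
    | (lo, hi) :: t =>
      ((if v < lo then v else lo), (if v > hi then v else hi)) :: (lo, hi) :: t

def findIndices_alt (nums : List Int) (indexDifference : Int) (valueDifference : Int) : List Int :=
  if indexDifference = 0 ∧ valueDifference = 0 then [0, 0]
  else
    let n : Int := nums.length
    let gap : Int := if indexDifference > 0 then indexDifference else 0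
    let suf := sufMM nums
    match (PySem.List.pyRange 0 (n - 1) 1).findSome? (fun i =>
      let s := i + gap
      if s < n then
        let p := PySem.List.pyGetD suf s (0, 0)
        let x := PySem.List.pyGetD nums i 0
        if x - p.1 ≥ valueDifference ∨ p.2 - x ≥ valueDifference then
          (PySem.List.pyRange s n 1).findSome? (fun j =>
            if |x - PySem.List.pyGetD nums j 0| ≥ valueDifference then some [i, j] else none)
        else none
      else none) with
    | some r => r
    | none => [-1, -1]

-- ===== PRECONDITION & SPEC =====
def Spec_findIndices (nums : List Int) (indexDifference : Int) (valueDifference : Int) (out : List Int) : Prop := out = findIndices_alt nums indexDifference valueDifference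
instance (nums : List Int) (indexDifference : Int) (valueDifference : Int) (out : List Int) : Decidable (Spec_findIndices nums indexDifference valueDifference out) := by unfold Spec_findIndices; infer_instance

-- ===== CLAIM (what is proved, stated in full; the proofs are below) =====
def Claim_equal_findIndices : Prop := ∀ (nums : List Int) (indexDifference : Int) (valueDifference : Int), Dom_findIndices nums indexDifference valueDifference → Spec_findIndices nums indexDifference valueDifference (findIndices nums indexDifference valueDifference)

-- ===== LEMMAS AND PROOFS =====

theorem findSome?_congr_mem {α β : Type} (l : List α) (f g : α → Option β)
    (h : ∀ a ∈ l, f a = g a) : l.findSome? f = l.findSome? g := by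
  induction l with
  | nil => rfl
  | cons a t ih =>
    simp only [List.findSome?_cons, h a (List.mem_cons_self), ih (fun b hb => h b (List.mem_cons_of_mem a hb))]

theorem sufMM_length (l : List Int) : (sufMM l).length = l.length := by
  induction l with
  | nil => rfl
  | cons v rest ih =>
    unfold sufMM
    cases h : sufMM rest with
    | nil => rw [h] at ih; simp_all
    | cons p t => cases p; rw [h] at ih; simp_all

theorem sufMM_spec (l : List Int) : ∀ (k : Nat) (p : Int × Int), (sufMM l)[k]? = some p →
    p.1 ∈ l.drop k ∧ p.2 ∈ l.drop k ∧ ∀ y ∈ l.drop k, p.1 ≤ y ∧ y ≤ p.2 := by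
  induction l with
  | nil => intro k p hp; simp [sufMM] at hp
  | cons v rest ih =>
    intro k p hp
    unfold sufMM at hp
    cases h : sufMM rest with
    | nil =>
      have hrest : rest = [] := by
        have := sufMM_length rest; rw [h] at this; exact List.length_eq_zero_iff.mp this.symm
      subst hrest
      rw [h] at hp
      match k with
      | 0 => simp at hp; subst hp; simp
      | k + 1 => simp at hp
    | cons q t =>
      obtain ⟨lo, hi⟩ := q
      rw [h] at hp
      match k with
      | 0 =>
        simp at hp
        have hq : (sufMM rest)[0]? = some (lo, hi) := by rw [h]; rfl
        obtain ⟨h1, h2, h3⟩ := ih 0 (lo, hi) hq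
        simp at h1 h2 h3
        subst hp
        refine ⟨?_, ?_, ?_⟩
        · simp only [List.drop_zero]
          by_cases hv : v < lo <;> simp [hv, h1]
        · simp only [List.drop_zero]
          by_cases hv : v > hi <;> simp [hv, h2]
        · intro y hy
          simp only [List.drop_zero, List.mem_cons] at hy
          rcases hy with rfl | hy
          · constructor
            · split <;> omega
            · split <;> omega
          · obtain ⟨hl, hr⟩ := h3 y hy
            constructor
            · split <;> omega
            · split <;> omega
      | k + 1 =>
        simp only [List.getElem?_cons_succ] at hp
        have hq : (sufMM rest)[k]? = some p := by rw [h]; exact hp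
        simpa using ih k p hq

-- per-index agreement of the two search bodies, for 0 ≤ i < n-1 (the range of the outer loop)
theorem inner_eq (nums : List Int) (indexDifference valueDifference : Int)
    (i : Int) (hi0 : 0 ≤ i) (hin : i < (nums.length : Int) - 1) :
    (PySem.List.pyRange i (nums.length : Int) 1).findSome? (fun j =>
        if |i - j| ≥ indexDifference ∧
           |PySem.List.pyGetD nums i 0 - PySem.List.pyGetD nums j 0| ≥ valueDifference
        then some [i, j] else none) =
    (let n : Int := nums.length
     let gap : Int := if indexDifference > 0 then indexDifference else 0
     let s := i + gap
     if s < n then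
       let p := PySem.List.pyGetD (sufMM nums) s (0, 0)
       let x := PySem.List.pyGetD nums i 0
       if x - p.1 ≥ valueDifference ∨ p.2 - x ≥ valueDifference then
         (PySem.List.pyRange s n 1).findSome? (fun j =>
           if |x - PySem.List.pyGetD nums j 0| ≥ valueDifference then some [i, j] else none)
       else none
     else none) := by
  have hn : i < (nums.length : Int) := by omega
  simp only []
  set gap : Int := if indexDifference > 0 then indexDifference else 0 with hgap
  have hgap0 : 0 ≤ gap := by rw [hgap]; split <;> omega
  have hgapid : indexDifference ≤ gap := by rw [hgap]; split <;> omega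
  by_cases hs : i + gap < (nums.length : Int)
  · rw [if_pos hs]
    have hgt : gap > 0 → gap = indexDifference := by
      intro h; rw [hgap] at h ⊢; by_cases hid : indexDifference > 0 <;> simp [hid] at h ⊢
    rw [PySem.List.pyRange_one_append i (i + gap) (nums.length : Int) (by omega) (by omega),
        List.findSome?_append]
    have h1 : (PySem.List.pyRange i (i + gap) 1).findSome? (fun j =>
        if |i - j| ≥ indexDifference ∧
           |PySem.List.pyGetD nums i 0 - PySem.List.pyGetD nums j 0| ≥ valueDifference
        then some [i, j] else none) = none := by
      rw [List.findSome?_eq_none_iff]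
      intro j hj
      rw [PySem.List.mem_pyRange_one] at hj
      have habs : |i - j| = j - i := by
        rw [abs_sub_comm]; exact abs_of_nonneg (by omega)
      have hg : gap = indexDifference := hgt (by omega)
      rw [if_neg]; rintro ⟨hc, -⟩; omega
    rw [h1, Option.none_or]
    have h2 : ∀ j ∈ PySem.List.pyRange (i + gap) (nums.length : Int) 1,
        (if |i - j| ≥ indexDifference ∧
            |PySem.List.pyGetD nums i 0 - PySem.List.pyGetD nums j 0| ≥ valueDifference
         then some [i, j] else none) =
        (if |PySem.List.pyGetD nums i 0 - PySem.List.pyGetD nums j 0| ≥ valueDifference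
         then some [i, j] else none) := by
      intro j hj
      rw [PySem.List.mem_pyRange_one] at hj
      have habs : |i - j| = j - i := by
        rw [abs_sub_comm]; exact abs_of_nonneg (by omega)
      by_cases hv : |PySem.List.pyGetD nums i 0 - PySem.List.pyGetD nums j 0| ≥ valueDifference
      · rw [if_pos hv, if_pos ⟨by omega, hv⟩]
      · rw [if_neg hv, if_neg]; rintro ⟨-, hc⟩; exact hv hc
    rw [findSome?_congr_mem _ _ _ h2]
    by_cases hpre : PySem.List.pyGetD nums i 0 - (PySem.List.pyGetD (sufMM nums) (i + gap) (0, 0)).1 ≥ valueDifference ∨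
        (PySem.List.pyGetD (sufMM nums) (i + gap) (0, 0)).2 - PySem.List.pyGetD nums i 0 ≥ valueDifference
    · rw [if_pos hpre]
    · rw [if_neg hpre]
      -- the suffix-(min,max) pair at position i + gap
      have hlen : ((sufMM nums).length : Int) = (nums.length : Int) := by
        rw [sufMM_length]
      have hp : PySem.List.pyGetD (sufMM nums) (i + gap) (0, 0) =
          (sufMM nums)[(i + gap).toNat]'(by omega) := by
        apply PySem.List.pyGetD_eq_getElem <;> omega
      have hsome : (sufMM nums)[(i + gap).toNat]? =
          some ((sufMM nums)[(i + gap).toNat]'(by omega)) := by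
        rw [List.getElem?_eq_getElem]
      obtain ⟨hlo, hhi, hbound⟩ := sufMM_spec nums (i + gap).toNat _ hsome
      rw [List.findSome?_eq_none_iff]
      intro j hj
      rw [PySem.List.mem_pyRange_one] at hj
      have hx : PySem.List.pyGetD nums j 0 = nums[j.toNat]'(by omega) := by
        apply PySem.List.pyGetD_eq_getElem <;> omega
      have hmem : nums[j.toNat]'(by omega) ∈ nums.drop (i + gap).toNat := by
        have hk : (i + gap).toNat + (j.toNat - (i + gap).toNat) = j.toNat := by omega
        have hlt : j.toNat - (i + gap).toNat < (nums.drop (i + gap).toNat).length := by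
          simp [List.length_drop]; omega
        have := List.getElem_drop (xs := nums) (i := (i + gap).toNat)
          (j := j.toNat - (i + gap).toNat) (h := hlt)
        simp only [hk] at this
        exact this ▸ List.getElem_mem hlt
      obtain ⟨hl, hr⟩ := hbound _ hmem
      rw [if_neg]
      intro hc
      rw [hx] at hc
      rw [hp] at hpre
      rcases abs_choice (PySem.List.pyGetD nums i 0 - nums[j.toNat]'(by omega)) with he | he <;>
        rw [he] at hc <;> exact hpre (by omega)
  · rw [if_neg hs]
    rw [List.findSome?_eq_none_iff]
    intro j hj
    rw [PySem.List.mem_pyRange_one] at hj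
    have hgpos : gap > 0 := by omega
    have hg : gap = indexDifference := by
      rw [hgap] at hgpos ⊢; by_cases hid : indexDifference > 0 <;> simp [hid] at hgpos ⊢
    have habs : |i - j| = j - i := by
      rw [abs_sub_comm]; exact abs_of_nonneg (by omega)
    rw [if_neg]; rintro ⟨hc, -⟩; omega

-- ===== VERDICT (by name: the statement is the Claim_ definition above) =====
theorem findIndices_spec : Claim_equal_findIndices := by
  intro nums indexDifference valueDifference _
  unfold Spec_findIndices findIndices findIndices_alt
  by_cases h0 : indexDifference = 0 ∧ valueDifference = 0
  · simp [h0]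
  · simp only [h0, if_false]
    have hcongr : (PySem.List.pyRange 0 ((nums.length : Int) - 1) 1).findSome? (fun i =>
        (PySem.List.pyRange i (nums.length : Int) 1).findSome? (fun j =>
          if |i - j| ≥ indexDifference ∧
             |PySem.List.pyGetD nums i 0 - PySem.List.pyGetD nums j 0| ≥ valueDifference
          then some [i, j] else none)) =
        (PySem.List.pyRange 0 ((nums.length : Int) - 1) 1).findSome? (fun i =>
          let s := i + (if indexDifference > 0 then indexDifference else 0)
          if s < (nums.length : Int) then
            let p := PySem.List.pyGetD (sufMM nums) s (0, 0)
            let x := PySem.List.pyGetD nums i 0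
            if x - p.1 ≥ valueDifference ∨ p.2 - x ≥ valueDifference then
              (PySem.List.pyRange s (nums.length : Int) 1).findSome? (fun j =>
                if |x - PySem.List.pyGetD nums j 0| ≥ valueDifference then some [i, j] else none)
            else none
          else none) := by
      apply findSome?_congr_mem
      intro i hi
      rw [PySem.List.mem_pyRange_one] at hi
      exact inner_eq nums indexDifference valueDifference i hi.1 hi.2
    rw [hcongr]
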